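-- pv_equiv track=rewrite | github.com/AlexandrBarz/HomeworkPython | Homework14.py | fibo_num
-- ===== SOURCE A (Python) =====
-- def fibo_num(n):
--     fibo_num =[]
--     fib1, fib2 = 1, 1
--     for i in range(n):
--         fibo_num.append(fib1)
--         fib1, fib2 = fib2, fib1 + fib2
--     fib1, fib2 = 0, 1
--     for i in range(n + 1):
--         fibo_num.insert(0, fib1)
--         fib1, fib2 = fib2, fib1 - fib2
--     return fibo_num
-- ===== SOURCE B (Python) =====
-- def fibo_num(n):
--     # One forward Fibonacci pass, then the negative half via F(-k) = (-1)**(k+1) * F(k).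
--     if n < 0:
--         return []
--     fibs = [0, 1]
--     for _ in range(1, n):
--         fibs.append(fibs[-1] + fibs[-2])
--     fibs = fibs[:n + 1]
--     neg = [(-1) ** (k + 1) * fibs[k] for k in range(n, 0, -1)]
--     return neg + fibs
-- ===== Notes on version B (the rewrite author's own statement) =====
-- stated objective: faster
-- what changed: A steps a second subtract-recurrence backwards and prepends each term with insert(0,...); B builds one forward Fibonacci list and derives the negative half from the alternating-sign identity F(-k) = (-1)**(k+1) * F(k), appending only.
import Mathlib
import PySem

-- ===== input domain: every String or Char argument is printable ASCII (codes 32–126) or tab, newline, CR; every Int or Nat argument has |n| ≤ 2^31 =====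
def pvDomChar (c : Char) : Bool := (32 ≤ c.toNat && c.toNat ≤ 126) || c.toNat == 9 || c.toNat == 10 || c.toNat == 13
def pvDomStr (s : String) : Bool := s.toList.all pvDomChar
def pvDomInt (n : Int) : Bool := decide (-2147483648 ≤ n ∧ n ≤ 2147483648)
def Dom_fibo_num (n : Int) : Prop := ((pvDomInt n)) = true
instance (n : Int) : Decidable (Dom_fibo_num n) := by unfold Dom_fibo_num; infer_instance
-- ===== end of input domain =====

-- B replaces A's backward subtract-recurrence by one forward Fibonacci list plus the sign identity F(-k) = (-1)^(k+1)·F(k) (objective: alternative decomposition).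

-- ===== PORT A =====
-- loop body of A's first loop: fibo_num.append(fib1); fib1, fib2 = fib2, fib1 + fib2
def stepA1 (st : List Int × Int × Int) : List Int × Int × Int :=
  (st.1 ++ [st.2.1], st.2.2, st.2.1 + st.2.2)

-- loop body of A's second loop: fibo_num.insert(0, fib1); fib1, fib2 = fib2, fib1 - fib2
def stepA2 (st : List Int × Int × Int) : List Int × Int × Int :=
  (st.2.1 :: st.1, st.2.2, st.2.1 - st.2.2)

def fibo_num (n : Int) : List Int :=
  let s1 := (PySem.List.pyRange 0 n 1).foldl (fun st _ => stepA1 st) ([], 1, 1)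
  let s2 := (PySem.List.pyRange 0 (n + 1) 1).foldl (fun st _ => stepA2 st) (s1.1, 0, 1)
  s2.1

-- ===== PORT B =====
-- loop body of B's loop: fibs.append(fibs[-1] + fibs[-2]); pyGetD is exact here since the list always has ≥ 2 elements
def stepB (l : List Int) : List Int :=
  l ++ [PySem.List.pyGetD l (-1) 0 + PySem.List.pyGetD l (-2) 0]

def fibo_num_alt (n : Int) : List Int :=
  if n < 0 then []
  else
    let fibs1 := (PySem.List.pyRange 1 n 1).foldl (fun l _ => stepB l) [0, 1]
    let fibs := PySem.List.slice fibs1 none (some (n + 1))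
    let neg := (PySem.List.pyRange n 0 (-1)).map
      (fun k => (-1 : Int) ^ (k + 1).toNat * PySem.List.pyGetD fibs k 0)
    neg ++ fibs

-- ===== PRECONDITION & SPEC =====
def Spec_fibo_num (n : Int) (out : List Int) : Prop := out = fibo_num_alt n
instance (n : Int) (out : List Int) : Decidable (Spec_fibo_num n out) := by unfold Spec_fibo_num; infer_instance

-- ===== CLAIM (what is proved, stated in full; the proofs are below) =====
def Claim_equal_fibo_num : Prop := ∀ (n : Int), Dom_fibo_num n → Spec_fibo_num n (fibo_num n)

-- ===== LEMMAS AND PROOFS =====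

-- standard Fibonacci
def fib : Nat → Int
  | 0 => 0
  | 1 => 1
  | k + 2 => fib k + fib (k + 1)

-- F(-k) = (-1)^(k+1) * F(k)
def nf (k : Nat) : Int := (-1 : Int) ^ (k + 1) * fib k

-- [nf m, nf (m-1), …, nf 1]
def negList : Nat → List Int
  | 0 => []
  | j + 1 => nf (j + 1) :: negList j

lemma nf_sub (m : Nat) : nf m - nf (m + 1) = nf (m + 2) := by
  simp only [nf, show fib (m + 2) = fib m + fib (m + 1) from rfl, pow_succ]
  ring

lemma foldl_ignore {σ α : Type} (g : σ → σ) (l : List α) (st : σ) :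
    l.foldl (fun s _ => g s) st = g^[l.length] st := by
  induction l generalizing st with
  | nil => rfl
  | cons x xs ih => simp [List.foldl_cons, ih, Function.iterate_succ_apply]

lemma iterA1 (m : Nat) :
    stepA1^[m] ([], 1, 1) = ((List.range m).map (fun k => fib (k + 1)), fib (m + 1), fib (m + 2)) := by
  induction m with
  | zero => rfl
  | succ m ih =>
      rw [Function.iterate_succ_apply', ih]
      simp [stepA1, List.range_succ, show fib (m + 3) = fib (m + 1) + fib (m + 2) from rfl]

lemma iterA2 (m : Nat) (L : List Int) :
    stepA2^[m] (L, 0, 1) = ((List.range m).reverse.map nf ++ L, nf m, nf (m + 1)) := by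
  induction m with
  | zero => simp [nf, fib]
  | succ m ih =>
      rw [Function.iterate_succ_apply', ih]
      simp [stepA2, List.range_succ, nf_sub]

lemma iterB (j : Nat) :
    stepB^[j] [0, 1] = (List.range (j + 2)).map fib := by
  induction j with
  | zero => simp [List.range_succ, fib]
  | succ j ih =>
      rw [Function.iterate_succ_apply', ih, stepB]
      have hlast : PySem.List.pyGetD ((List.range (j + 2)).map fib) (-1) 0 = fib (j + 1) := by
        rw [show (List.range (j + 2)).map fib
              = (List.range (j + 1)).map fib ++ [fib (j + 1)] by
            simp [List.range_succ]]
        exact PySem.List.pyGetD_neg_one_append_singleton _ _ _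
      have hlen : ((List.range (j + 2)).map fib).length = j + 2 := by simp
      have hprev : PySem.List.pyGetD ((List.range (j + 2)).map fib) (-2) 0 = fib j := by
        rw [PySem.List.pyGetD_neg_ofNat _ 2 _ (by norm_num) (by simp)]
        simp
      rw [hlast, hprev]
      simp [List.range_succ, show fib (j + 2) = fib j + fib (j + 1) from rfl, add_comm]

lemma negList_eq_A (m : Nat) :
    (List.range m).reverse.map (fun k => nf (k + 1)) = negList m := by
  induction m with
  | zero => rfl
  | succ m ih => simp [List.range_succ, negList, ih]

lemma negList_eq_B (m : Nat) :
    (List.range m).map (fun k => nf (m - k)) = negList m := by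
  induction m with
  | zero => rfl
  | succ m ih =>
      rw [List.range_succ_eq_map, List.map_cons, List.map_map]
      have hc : ((fun k => nf (m + 1 - k)) ∘ Nat.succ) = (fun k => nf (m - k)) := by
        funext k; simp [Nat.succ_sub_succ]
      rw [hc, ih]
      simp [negList]

-- A's value in closed form
lemma fibo_num_closed (n : Int) (hn : 0 ≤ n) :
    fibo_num n = (List.range (n.toNat + 1)).reverse.map nf
        ++ (List.range n.toNat).map (fun k => fib (k + 1)) := by
  have h1 : (PySem.List.pyRange 0 n 1).length = n.toNat := by
    rw [PySem.List.length_pyRange_one]; omega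
  have h2 : (PySem.List.pyRange 0 (n + 1) 1).length = n.toNat + 1 := by
    rw [PySem.List.length_pyRange_one]; omega
  simp only [fibo_num, foldl_ignore, h1, h2, iterA1, iterA2]

-- A returns [] for negative n
lemma fibo_num_neg (n : Int) (hn : n < 0) : fibo_num n = [] := by
  have h1 : PySem.List.pyRange 0 n 1 = [] := PySem.List.pyRange_one_eq_nil (by omega)
  have h2 : PySem.List.pyRange 0 (n + 1) 1 = [] := PySem.List.pyRange_one_eq_nil (by omega)
  simp [fibo_num, h1, h2]

-- B's fibs list is [F(0), …, F(n)]
lemma fibs_closed (n : Int) (hn : 0 ≤ n) :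
    PySem.List.slice ((PySem.List.pyRange 1 n 1).foldl (fun l _ => stepB l) [0, 1])
        none (some (n + 1))
      = (List.range (n.toNat + 1)).map fib := by
  have hlen : (PySem.List.pyRange 1 n 1).length = (n - 1).toNat := by
    rw [PySem.List.length_pyRange_one]
  rw [foldl_ignore, hlen, iterB]
  rw [show (n + 1) = (((n.toNat + 1 : Nat)) : Int) by omega, PySem.List.slice_to_natCast]
  rw [← List.map_take, List.take_range]
  congr 2
  omega

-- B's value in closed form
lemma fibo_num_alt_closed (n : Int) (hn : 0 ≤ n) :
    fibo_num_alt n = negList n.toNat ++ (List.range (n.toNat + 1)).map fib := by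
  rw [fibo_num_alt, if_neg (by omega)]
  simp only [fibs_closed n hn]
  congr 1
  rw [PySem.List.pyRange_neg_one, List.map_map, ← negList_eq_B]
  simp only [Int.sub_zero]
  apply List.map_congr_left
  intro k hk
  rw [List.mem_range] at hk
  simp only [Function.comp_apply]
  have e1 : n - (k : Int) = ((n.toNat - k : Nat) : Int) := by omega
  have e2 : (n - (k : Int) + 1).toNat = n.toNat - k + 1 := by omega
  rw [e2, e1, PySem.List.pyGetD_natCast]
  rw [List.getD_eq_getElem?_getD, List.getElem?_map, List.getElem?_range (by omega)]
  simp [nf]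

-- peel nf 0 = fib 0 = 0 off A's reversed half
lemma A_split (m : Nat) :
    (List.range (m + 1)).reverse.map nf ++ (List.range m).map (fun k => fib (k + 1))
      = negList m ++ (List.range (m + 1)).map fib := by
  have h1 : (List.range (m + 1)).reverse.map nf
      = (List.range m).reverse.map (fun k => nf (k + 1)) ++ [nf 0] := by
    rw [List.range_succ_eq_map, List.reverse_cons, List.map_append]
    congr 1
    rw [← List.map_reverse, List.map_map]
    rfl
  rw [h1, negList_eq_A, List.range_succ_eq_map, List.map_cons, List.map_map]
  simp [nf, fib, Function.comp]

-- ===== VERDICT (by name: the statement is the Claim_ definition above) =====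
theorem fibo_num_spec : Claim_equal_fibo_num := by
  intro n _
  unfold Spec_fibo_num
  rcases lt_or_ge n 0 with h | h
  · rw [fibo_num_neg n h, fibo_num_alt, if_pos h]
  · rw [fibo_num_closed n h, fibo_num_alt_closed n h, A_split]
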